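-- pv_equiv track=rewrite | github.com/bavi404/omr-scanner-yolov8 | omr_processor.py | group_bubbles_into_questions
-- ===== SOURCE A (Python) =====
-- def group_bubbles_into_questions(bubbles, vertical_threshold=8, horizontal_threshold=30):
--     """Group bubbles into questions supporting multi-column layouts."""
--     if not bubbles:
--         return []
--
--     # Step 1: Group by Y-coordinate into rows
--     sorted_by_y = sorted(bubbles, key=lambda b: b["center"][1])
--
--     rows = []
--     current_row = [sorted_by_y[0]]
--
--     for i in range(1, len(sorted_by_y)):
--         prev_y = sorted_by_y[i-1]["center"][1]
--         curr_y = sorted_by_y[i]["center"][1]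
--
--         if abs(curr_y - prev_y) <= vertical_threshold:
--             current_row.append(sorted_by_y[i])
--         else:
--             rows.append(current_row)
--             current_row = [sorted_by_y[i]]
--
--     rows.append(current_row)
--
--     # Step 2: Within each row, group by X-coordinate (handle multiple columns)
--     all_questions = []
--
--     for row in rows:
--         # Sort bubbles in row by X-coordinate
--         row_sorted = sorted(row, key=lambda b: b["center"][0])
--
--         # Group by X-position to separate columns
--         column_groups = []
--         current_group = [row_sorted[0]]
--
--         for i in range(1, len(row_sorted)):
--             prev_x = row_sorted[i-1]["center"][0]
--             curr_x = row_sorted[i]["center"][0]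
--
--             # If X-gap is large, it's a new column/question
--             if abs(curr_x - prev_x) > horizontal_threshold:
--                 column_groups.append(current_group)
--                 current_group = [row_sorted[i]]
--             else:
--                 current_group.append(row_sorted[i])
--
--         column_groups.append(current_group)
--
--         # Each column group in a row is a separate question
--         for group in column_groups:
--             # Sort left to right within question
--             group_sorted = sorted(group, key=lambda b: b["center"][0])
--             # Only keep groups with 1-8 bubbles (valid question) - be flexible
--             if 1 <= len(group_sorted) <= 8:
--                 all_questions.append(group_sorted)
--
--     return all_questions
-- ===== SOURCE B (Python) =====
-- def group_bubbles_into_questions(bubbles, vertical_threshold=8, horizontal_threshold=30):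
--     """Group bubbles into questions supporting multi-column layouts."""
--
--     def split(items, axis, thr):
--         # Divide and conquer: cut the sorted run at its widest gap while that
--         # gap exceeds the threshold, then recurse on both halves.
--         if len(items) <= 1:
--             return [items] if items else []
--         gaps = [abs(b["center"][axis] - a["center"][axis]) for a, b in zip(items, items[1:])]
--         widest = max(gaps)
--         if widest <= thr:
--             return [items]
--         k = gaps.index(widest)
--         return split(items[:k+1], axis, thr) + split(items[k+1:], axis, thr)
--
--     rows = split(sorted(bubbles, key=lambda b: b["center"][1]), 1, vertical_threshold)
--     return [g for row in rows
--               for g in split(sorted(row, key=lambda b: b["center"][0]), 0, horizontal_threshold)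
--               if len(g) <= 8]
-- ===== Notes on version B (the rewrite author's own statement) =====
-- stated objective: alternative
-- what changed: B replaces A's linear accumulate-or-flush scans by a divide-and-conquer splitter that repeatedly cuts the sorted run at its widest gap while that gap exceeds the threshold and recurses on both halves (correct because every gap above the threshold is a cut point regardless of the order cuts are made), and drops A's redundant per-group re-sort.
import Mathlib
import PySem

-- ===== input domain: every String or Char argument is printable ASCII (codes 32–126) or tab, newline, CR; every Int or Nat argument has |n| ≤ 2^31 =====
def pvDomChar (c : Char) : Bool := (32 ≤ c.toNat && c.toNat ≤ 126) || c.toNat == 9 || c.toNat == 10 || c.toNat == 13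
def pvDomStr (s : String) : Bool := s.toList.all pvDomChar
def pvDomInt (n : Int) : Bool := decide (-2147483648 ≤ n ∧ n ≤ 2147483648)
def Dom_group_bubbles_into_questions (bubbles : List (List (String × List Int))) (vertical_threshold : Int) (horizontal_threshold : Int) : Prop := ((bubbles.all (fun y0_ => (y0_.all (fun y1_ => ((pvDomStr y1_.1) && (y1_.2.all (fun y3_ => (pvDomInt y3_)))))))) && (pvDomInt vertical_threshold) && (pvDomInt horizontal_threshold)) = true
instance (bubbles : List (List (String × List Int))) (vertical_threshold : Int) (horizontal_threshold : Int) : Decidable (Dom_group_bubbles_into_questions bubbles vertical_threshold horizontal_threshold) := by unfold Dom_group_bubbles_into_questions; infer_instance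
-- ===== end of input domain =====

-- B replaces A's accumulate-or-flush scans by divide and conquer: cut the sorted run at its
-- widest gap while that gap exceeds the threshold, recurse on both halves; it also drops A's
-- redundant per-group re-sort (alternative algorithm, same result).

-- shared accessor: b["center"][axis]; the getD defaults are never reached on Pre_ (key present, len ≥ 2)
def pvCoord (b : List (String × List Int)) (ax : Int) : Int :=
  PySem.List.pyGetD ((PySem.Dict.get? (PySem.Dict.mk b) "center").getD []) ax 0

-- ===== PORT A =====
def group_bubbles_into_questions (bubbles : List (List (String × List Int))) (vertical_threshold : Int) (horizontal_threshold : Int) : List (List (List (String × List Int))) :=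
  if bubbles = [] then []
  else
    let sorted_by_y := PySem.List.sorted bubbles (fun b => pvCoord b 1)
    let st := (PySem.List.pyRange 1 (sorted_by_y.length : Int)).foldl
      (fun (s : List (List (List (String × List Int))) × List (List (String × List Int))) i =>
        let prev_y := pvCoord (PySem.List.pyGetD sorted_by_y (i - 1) []) 1
        let curr_y := pvCoord (PySem.List.pyGetD sorted_by_y i []) 1
        if |curr_y - prev_y| ≤ vertical_threshold then
          (s.1, s.2 ++ [PySem.List.pyGetD sorted_by_y i []])
        else
          (s.1 ++ [s.2], [PySem.List.pyGetD sorted_by_y i []]))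
      ([], [PySem.List.pyGetD sorted_by_y 0 []])
    let rows := st.1 ++ [st.2]
    rows.foldl
      (fun all_questions row =>
        let row_sorted := PySem.List.sorted row (fun b => pvCoord b 0)
        let st2 := (PySem.List.pyRange 1 (row_sorted.length : Int)).foldl
          (fun (s : List (List (List (String × List Int))) × List (List (String × List Int))) i =>
            let prev_x := pvCoord (PySem.List.pyGetD row_sorted (i - 1) []) 0
            let curr_x := pvCoord (PySem.List.pyGetD row_sorted i []) 0
            if horizontal_threshold < |curr_x - prev_x| then
              (s.1 ++ [s.2], [PySem.List.pyGetD row_sorted i []])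
            else
              (s.1, s.2 ++ [PySem.List.pyGetD row_sorted i []]))
          ([], [PySem.List.pyGetD row_sorted 0 []])
        let column_groups := st2.1 ++ [st2.2]
        column_groups.foldl
          (fun aq group =>
            let group_sorted := PySem.List.sorted group (fun b => pvCoord b 0)
            if 1 ≤ group_sorted.length ∧ group_sorted.length ≤ 8 then aq ++ [group_sorted] else aq)
          all_questions)
      []

-- ===== PORT B =====
-- gaps = [abs(b["center"][axis] - a["center"][axis]) for a, b in zip(items, items[1:])]
def pvGaps (items : List (List (String × List Int))) (ax : Int) : List Int :=
  (items.zip (PySem.List.slice items (some 1) none)).map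
    (fun p => |pvCoord p.2 ax - pvCoord p.1 ax|)

-- widest = max(gaps)  (never reached on empty gaps: split recurses only with len ≥ 2)
def pvWidest (items : List (List (String × List Int))) (ax : Int) : Int :=
  ((PySem.List.max? (pvGaps items ax) (fun g => g)).getD 0)

-- k = gaps.index(widest)
def pvK (items : List (List (String × List Int))) (ax : Int) : Nat :=
  ((PySem.List.index? (pvGaps items ax) (pvWidest items ax)).getD 0)

-- split(items, axis, thr): recursively cut at the widest gap while it exceeds thr
-- (fuel = items.length bounds the recursion depth; it is never exhausted)
def pvSplit (fuel : Nat) (items : List (List (String × List Int))) (ax : Int) (thr : Int) :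
    List (List (List (String × List Int))) :=
  match fuel with
  | 0 => if items = [] then [] else [items]
  | fuel + 1 =>
    if items.length ≤ 1 then (if items = [] then [] else [items])
    else
      if pvWidest items ax ≤ thr then [items]
      else
        pvSplit fuel (PySem.List.slice items none (some ((pvK items ax : Int) + 1))) ax thr
          ++ pvSplit fuel (PySem.List.slice items (some ((pvK items ax : Int) + 1)) none) ax thr

def group_bubbles_into_questions_alt (bubbles : List (List (String × List Int))) (vertical_threshold : Int) (horizontal_threshold : Int) : List (List (List (String × List Int))) :=
  let rows := pvSplit (PySem.List.sorted bubbles (fun b => pvCoord b 1)).length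
    (PySem.List.sorted bubbles (fun b => pvCoord b 1)) 1 vertical_threshold
  rows.flatMap (fun row =>
    (pvSplit (PySem.List.sorted row (fun b => pvCoord b 0)).length
      (PySem.List.sorted row (fun b => pvCoord b 0)) 0 horizontal_threshold).filter
      (fun g => decide (g.length ≤ 8)))

-- ===== PRECONDITION & SPEC =====
-- Pre_ excludes exactly the inputs where Python A raises: a bubble without a "center" key
-- (KeyError) or whose center list has fewer than 2 entries (IndexError).
def Pre_group_bubbles_into_questions (bubbles : List (List (String × List Int))) (vertical_threshold : Int) (horizontal_threshold : Int) : Prop :=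
  ∀ b ∈ bubbles, 2 ≤ ((PySem.Dict.get? (PySem.Dict.mk b) "center").getD []).length
instance (bubbles : List (List (String × List Int))) (vertical_threshold : Int) (horizontal_threshold : Int) : Decidable (Pre_group_bubbles_into_questions bubbles vertical_threshold horizontal_threshold) := by unfold Pre_group_bubbles_into_questions; infer_instance

def pvWitness_group_bubbles_into_questions : (List (List (String × List Int))) × Int × Int :=
  ([[("center", [10, 20])], [("center", [50, 21])]], 8, 30)

def Spec_group_bubbles_into_questions (bubbles : List (List (String × List Int))) (vertical_threshold : Int) (horizontal_threshold : Int) (out : List (List (List (String × List Int)))) : Prop := out = group_bubbles_into_questions_alt bubbles vertical_threshold horizontal_threshold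
instance (bubbles : List (List (String × List Int))) (vertical_threshold : Int) (horizontal_threshold : Int) (out : List (List (List (String × List Int)))) : Decidable (Spec_group_bubbles_into_questions bubbles vertical_threshold horizontal_threshold out) := by unfold Spec_group_bubbles_into_questions; infer_instance

-- ===== CLAIM (what is proved, stated in full; the proofs are below) =====
def Claim_equal_group_bubbles_into_questions : Prop := ∀ (bubbles : List (List (String × List Int))) (vertical_threshold : Int) (horizontal_threshold : Int), Dom_group_bubbles_into_questions bubbles vertical_threshold horizontal_threshold → Pre_group_bubbles_into_questions bubbles vertical_threshold horizontal_threshold → Spec_group_bubbles_into_questions bubbles vertical_threshold horizontal_threshold (group_bubbles_into_questions bubbles vertical_threshold horizontal_threshold)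

-- ===== LEMMAS AND PROOFS =====

-- reference chunker: the canonical "split a sorted run at every gap > thr"; A's flush loop
-- and B's divide-and-conquer both compute it
def pvChunks {α : Type} (f : α → Int) (thr : Int) : List α → List (List α)
  | [] => []
  | [x] => [[x]]
  | x :: y :: ys =>
      if thr < |f y - f x| then
        [x] :: pvChunks f thr (y :: ys)
      else
        (x :: (pvChunks f thr (y :: ys)).headD []) :: (pvChunks f thr (y :: ys)).tail

theorem pvChunks_shape {α : Type} (f : α → Int) (thr : Int) :
    ∀ (t : List α) (x : α), ∃ h tl, pvChunks f thr (x :: t) = (x :: h) :: tl := by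
  intro t
  induction t with
  | nil => intro x; exact ⟨[], [], rfl⟩
  | cons y ys ih =>
    intro x
    obtain ⟨h, tl, heq⟩ := ih y
    by_cases hc : thr < |f y - f x|
    · exact ⟨[], pvChunks f thr (y :: ys), by simp [pvChunks, hc]⟩
    · exact ⟨y :: h, tl, by simp [pvChunks, hc, heq]⟩

theorem pvChunks_sublist {α : Type} (f : α → Int) (thr : Int) :
    ∀ (xs : List α), ∀ g ∈ pvChunks f thr xs, g.Sublist xs := by
  intro xs
  induction xs with
  | nil => simp [pvChunks]
  | cons x t ih =>
    match t with
    | [] => simp [pvChunks]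
    | y :: ys =>
      intro g hg
      by_cases hc : thr < |f y - f x|
      · simp only [pvChunks, if_pos hc, List.mem_cons] at hg
        rcases hg with rfl | hg
        · simp
        · exact (ih g hg).cons _
      · obtain ⟨h, tl, heq⟩ := pvChunks_shape f thr ys y
        simp only [pvChunks, if_neg hc, heq, List.headD_cons, List.tail_cons, List.mem_cons] at hg
        rcases hg with rfl | hg
        · have := ih (y :: h) (by rw [heq]; exact List.mem_cons_self)
          exact List.Sublist.cons₂ _ this
        · exact (ih g (by rw [heq]; exact List.mem_cons_of_mem _ hg)).cons _

theorem pvChunks_ne_nil {α : Type} (f : α → Int) (thr : Int) :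
    ∀ (xs : List α), ∀ g ∈ pvChunks f thr xs, g ≠ [] := by
  intro xs
  induction xs with
  | nil => simp [pvChunks]
  | cons x t ih =>
    match t with
    | [] => simp [pvChunks]
    | y :: ys =>
      intro g hg
      by_cases hc : thr < |f y - f x|
      · simp only [pvChunks, if_pos hc, List.mem_cons] at hg
        rcases hg with rfl | hg
        · simp
        · exact ih g hg
      · obtain ⟨h, tl, heq⟩ := pvChunks_shape f thr ys y
        simp only [pvChunks, if_neg hc, heq, List.headD_cons, List.tail_cons, List.mem_cons] at hg
        rcases hg with rfl | hg
        · simp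
        · exact ih g (by rw [heq]; exact List.mem_cons_of_mem _ hg)

-- a run whose every consecutive gap is within thr is a single chunk
theorem pvChunks_all_small {α : Type} (f : α → Int) (thr : Int) :
    ∀ (t : List α) (x : α),
      (∀ p ∈ (x :: t).zip t, |f p.2 - f p.1| ≤ thr) →
      pvChunks f thr (x :: t) = [x :: t] := by
  intro t
  induction t with
  | nil => intro x _; rfl
  | cons y ys ih =>
    intro x h
    have hxy : |f y - f x| ≤ thr := h (x, y) (by simp)
    have hrest : ∀ p ∈ (y :: ys).zip ys, |f p.2 - f p.1| ≤ thr := by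
      intro p hp
      exact h p (by simp only [List.zip_cons_cons, List.mem_cons]; right; exact hp)
    rw [pvChunks, if_neg (not_lt.mpr hxy), ih y hrest]
    simp

-- chunking distributes over a split at a gap wider than thr
theorem pvChunks_append_big {α : Type} (f : α → Int) (thr : Int) :
    ∀ (u : List α) (x y : α) (v : List α), thr < |f y - f x| →
      pvChunks f thr ((u ++ [x]) ++ y :: v)
        = pvChunks f thr (u ++ [x]) ++ pvChunks f thr (y :: v) := by
  intro u
  induction u with
  | nil =>
    intro x y v hgap
    simp only [List.nil_append, List.cons_append]
    conv_lhs => rw [pvChunks]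
    rw [if_pos hgap]
    rfl
  | cons a u' ih =>
    intro x y v hgap
    obtain ⟨b, w, hbw⟩ : ∃ b w, u' ++ [x] = b :: w :=
      List.exists_cons_of_ne_nil (List.append_ne_nil_of_right_ne_nil u' (by simp))
    have ihbw := ih x y v hgap
    rw [hbw] at ihbw
    have e1 : ((a :: u') ++ [x]) ++ y :: v = a :: b :: (w ++ y :: v) := by
      simp [hbw]
    have e2 : (a :: u') ++ [x] = a :: b :: w := by simp [hbw]
    rw [e1, e2]
    simp only [List.cons_append] at ihbw
    by_cases hc : thr < |f b - f a|
    · conv_lhs => rw [pvChunks]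
      conv_rhs => rw [pvChunks]
      simp only [if_pos hc, ihbw]
      simp
    · obtain ⟨hh, htl, hshape⟩ := pvChunks_shape f thr w b
      conv_lhs => rw [pvChunks]
      conv_rhs => rw [pvChunks]
      simp only [if_neg hc, ihbw, hshape]
      simp

-- B's divide-and-conquer computes the canonical chunking
theorem pvSplit_eq_chunks (ax thr : Int) : ∀ (fuel : Nat) (items : List (List (String × List Int))),
    items.length ≤ fuel →
    pvSplit fuel items ax thr = pvChunks (fun b => pvCoord b ax) thr items := by
  intro fuel
  induction fuel with
  | zero =>
    intro items hlen
    have h0 : items = [] := List.eq_nil_of_length_eq_zero (by omega)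
    subst h0
    rfl
  | succ fuel ih =>
    intro items hlen
    rw [pvSplit]
    by_cases h1 : items.length ≤ 1
    · rw [if_pos h1]
      match items with
      | [] => rw [if_pos rfl]; rfl
      | [x] => rw [if_neg (by simp)]; rfl
      | a :: b :: t => exact absurd h1 (by simp)
    · rw [if_neg h1]
      have hglen : (pvGaps items ax).length = items.length - 1 := by
        simp [pvGaps, PySem.List.slice_from_one, List.length_zip, List.length_tail]
      have hne : pvGaps items ax ≠ [] := by
        intro h; rw [h] at hglen; simp at hglen; omega
      obtain ⟨m, hm⟩ : ∃ m, PySem.List.max? (pvGaps items ax) (fun g => g) = some m := by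
        cases h : PySem.List.max? (pvGaps items ax) (fun g => g) with
        | none => exact absurd ((PySem.List.max?_eq_none_iff _ _).mp h) hne
        | some m => exact ⟨m, rfl⟩
      have hwm : pvWidest items ax = m := by rw [pvWidest, hm]; rfl
      have hmax : ∀ g ∈ pvGaps items ax, g ≤ pvWidest items ax := by
        rw [hwm]; exact fun g hg => PySem.List.max?_isMax hm g hg
      have hgeq : pvGaps items ax
          = (items.zip items.tail).map (fun p => |pvCoord p.2 ax - pvCoord p.1 ax|) := by
        rw [pvGaps, PySem.List.slice_from_one]
      by_cases h2 : pvWidest items ax ≤ thr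
      · rw [if_pos h2]
        obtain ⟨x, t, hx⟩ := List.exists_cons_of_ne_nil (l := items)
          (by intro h; rw [h] at h1; simp at h1)
        have hall : ∀ p ∈ (x :: t).zip t, |pvCoord p.2 ax - pvCoord p.1 ax| ≤ thr := by
          intro p hp
          have hmem : |pvCoord p.2 ax - pvCoord p.1 ax| ∈ pvGaps items ax := by
            rw [hgeq, hx, List.tail_cons]
            exact List.mem_map_of_mem hp
          exact le_trans (hmax _ hmem) h2
        rw [hx]
        exact (pvChunks_all_small _ _ t x hall).symm
      · rw [if_neg h2]
        have hmemw : pvWidest items ax ∈ pvGaps items ax := by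
          rw [hwm]; exact PySem.List.max?_mem hm
        obtain ⟨kk, hk⟩ : ∃ kk, PySem.List.index? (pvGaps items ax) (pvWidest items ax) = some kk := by
          cases h : PySem.List.index? (pvGaps items ax) (pvWidest items ax) with
          | none => exact absurd hmemw ((PySem.List.index?_eq_none_iff _ _).mp h)
          | some kk => exact ⟨kk, rfl⟩
        obtain ⟨hklt, hgk, -⟩ := PySem.List.getElem_of_index?_eq_some hk
        have hkk : pvK items ax = kk := by rw [pvK, hk]; rfl
        have hklt' : kk < items.length - 1 := by rw [hglen] at hklt; exact hklt
        have h2n : 2 ≤ items.length := by omega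
        have hk1 : kk + 1 < items.length := by omega
        have hk0 : kk < items.length := by omega
        have hgv : (pvGaps items ax)[kk]'hklt
            = |pvCoord (items[kk+1]'hk1) ax - pvCoord (items[kk]'hk0) ax| := by
          simp only [hgeq, List.getElem_map, List.getElem_zip, List.getElem_tail]
        have hgap : thr < |pvCoord (items[kk+1]'hk1) ax - pvCoord (items[kk]'hk0) ax| := by
          rw [← hgv, hgk]; exact lt_of_not_ge h2
        have hsl1 : PySem.List.slice items none (some ((pvK items ax : Int) + 1))
            = items.take (kk+1) := by
          rw [hkk, show ((kk : Int) + 1) = ((kk+1 : Nat) : Int) from by push_cast; ring,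
              PySem.List.slice_to_natCast]
        have hsl2 : PySem.List.slice items (some ((pvK items ax : Int) + 1)) none
            = items.drop (kk+1) := by
          rw [hkk, show ((kk : Int) + 1) = ((kk+1 : Nat) : Int) from by push_cast; ring,
              PySem.List.slice_from_natCast]
        have htake : items.take (kk+1) = items.take kk ++ [items[kk]'hk0] := by
          rw [List.take_add_one, List.getElem?_eq_getElem hk0]
          rfl
        have hdrop : items.drop (kk+1) = items[kk+1]'hk1 :: items.drop (kk+2) := by
          rw [List.drop_eq_getElem_cons hk1]
        have hdecomp : items = (items.take kk ++ [items[kk]'hk0]) ++ items[kk+1]'hk1 :: items.drop (kk+2) := by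
          conv_lhs => rw [← List.take_append_drop (kk+1) items]
          rw [htake, hdrop]
        have e1 := ih (items.take (kk+1)) (by rw [List.length_take]; omega)
        have e2 := ih (items.drop (kk+1)) (by rw [List.length_drop]; omega)
        rw [hsl1, hsl2, e1, e2]
        conv_rhs => rw [hdecomp]
        rw [pvChunks_append_big (fun b => pvCoord b ax) thr (items.take kk) (items[kk]'hk0)
              (items[kk+1]'hk1) (items.drop (kk+2)) hgap, ← htake, ← hdrop]

theorem pv_foldl_consec {α σ : Type} (step : σ → α → α → σ) (d : α) (xs : List α) :
    ∀ (k : Nat) (init : σ), k ≤ xs.length →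
      (PySem.List.pyRange 1 (k : Int)).foldl
        (fun s i => step s (PySem.List.pyGetD xs (i - 1) d) (PySem.List.pyGetD xs i d)) init
      = ((xs.zip xs.tail).take (k - 1)).foldl (fun s p => step s p.1 p.2) init := by
  intro k
  induction k with
  | zero => intro init _; simp [PySem.List.pyRange_one_eq_nil]
  | succ k ih =>
    intro init hk
    match k, ih, hk with
    | 0, _, _ => simp [PySem.List.pyRange_one_eq_nil]
    | (m+1), ih, hk =>
      set n := m + 1 with hn
      have hlen : n + 1 ≤ xs.length := hk
      have e1 : PySem.List.pyRange 1 ((n+1 : Nat) : Int) = PySem.List.pyRange 1 (n : Int) ++ [(n : Int)] := by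
        rw [PySem.List.pyRange_one_append 1 (n : Int) ((n+1 : Nat) : Int) (by omega) (by push_cast; omega)]
        congr 1
        rw [PySem.List.pyRange_one_cons (by push_cast; omega), PySem.List.pyRange_one_eq_nil (by push_cast; omega)]
      have hzlen : (xs.zip xs.tail).length = xs.length - 1 := by
        simp [List.length_zip, List.length_tail]
      have hnz : n - 1 < (xs.zip xs.tail).length := by omega
      have hx1 : n - 1 < xs.length := by omega
      have hx2 : n < xs.length := by omega
      have hg1 : PySem.List.pyGetD xs ((n : Int) - 1) d = xs[n-1] := by
        rw [PySem.List.pyGetD_eq_getElem xs d (by omega) (by omega)]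
        congr 1
        omega
      have hg2 : PySem.List.pyGetD xs ((n : Int)) d = xs[n] := by
        rw [PySem.List.pyGetD_eq_getElem xs d (by omega) (by omega)]
        congr 1
      have hpair : (xs.zip xs.tail)[n-1] = (xs[n-1], xs[n]) := by
        rw [List.getElem_zip]
        congr 1
        rw [List.getElem_tail]
        congr 1
      have e2 : (xs.zip xs.tail).take (n + 1 - 1) = (xs.zip xs.tail).take (n - 1) ++ [(xs[n-1], xs[n])] := by
        rw [show n + 1 - 1 = (n - 1) + 1 by omega, List.take_add_one, List.getElem?_eq_getElem hnz, hpair]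
        rfl
      rw [e1, List.foldl_append, ih init (by omega), e2, List.foldl_append]
      simp [hg1, hg2]

theorem pv_pairs_chunks {α : Type} (f : α → Int) (thr : Int) :
    ∀ (t : List α) (x : α) (rows : List (List α)) (cur : List α) (h : List α) (tl : List (List α)),
      pvChunks f thr (x :: t) = (x :: h) :: tl →
      (let st := ((x :: t).zip t).foldl
          (fun (s : List (List α) × List α) p =>
            if thr < |f p.2 - f p.1| then (s.1 ++ [s.2], [p.2]) else (s.1, s.2 ++ [p.2]))
          (rows, cur)
       st.1 ++ [st.2]) = rows ++ ((cur ++ h) :: tl) := by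
  intro t
  induction t with
  | nil =>
    intro x rows cur h tl heq
    simp only [pvChunks] at heq
    injection heq with h1 h2
    injection h1 with _ h3
    subst h2
    subst h3
    simp
  | cons y ys ih =>
    intro x rows cur h tl heq
    obtain ⟨h', tl', heq'⟩ := pvChunks_shape f thr ys y
    by_cases hc : thr < |f y - f x|
    · rw [pvChunks, if_pos hc] at heq
      injection heq with h1 h2
      injection h1 with _ h3
      subst h2
      subst h3
      have := ih y (rows ++ [cur]) [y] h' tl' heq'
      simp only [List.zip_cons_cons, List.foldl_cons, if_pos hc]
      simp only at this
      rw [this, heq']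
      simp
    · rw [pvChunks, if_neg hc, heq', List.headD_cons, List.tail_cons] at heq
      injection heq with h1 h2
      injection h1 with _ h3
      subst h2
      subst h3
      have := ih y rows (cur ++ [y]) h' tl' heq'
      simp only [List.zip_cons_cons, List.foldl_cons, if_neg hc]
      simp only at this
      rw [this]
      simp

theorem pv_fold_chunks {α : Type} (f : α → Int) (thr : Int) (d : α) (x : α) (t : List α) :
    (let st := (PySem.List.pyRange 1 (((x :: t).length : Nat) : Int)).foldl
        (fun (s : List (List α) × List α) i =>
          if thr < |f (PySem.List.pyGetD (x :: t) i d) - f (PySem.List.pyGetD (x :: t) (i - 1) d)| then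
            (s.1 ++ [s.2], [PySem.List.pyGetD (x :: t) i d])
          else
            (s.1, s.2 ++ [PySem.List.pyGetD (x :: t) i d]))
        ([], [PySem.List.pyGetD (x :: t) 0 d])
     st.1 ++ [st.2]) = pvChunks f thr (x :: t) := by
  obtain ⟨h, tl, heq⟩ := pvChunks_shape f thr t x
  have h0 : PySem.List.pyGetD (x :: t) 0 d = x := by
    rw [PySem.List.pyGetD_eq_getElem _ d (by omega) (by simp)]
    rfl
  have hcons := pv_foldl_consec       (fun (s : List (List α) × List α) a b =>
        if thr < |f b - f a| then (s.1 ++ [s.2], [b]) else (s.1, s.2 ++ [b]))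
      d (x :: t) (x :: t).length ([], [PySem.List.pyGetD (x :: t) 0 d]) (le_refl _)
  have htake : (((x :: t).zip (x :: t).tail).take ((x :: t).length - 1)) = (x :: t).zip t := by
    rw [List.tail_cons]
    apply List.take_of_length_le
    simp [List.length_zip]
  rw [htake] at hcons
  have := pv_pairs_chunks f thr t x [] [PySem.List.pyGetD (x :: t) 0 d] h tl heq
  simp only at this ⊢
  rw [hcons, this, heq, h0]
  simp

-- A's step-1 loop writes the test as `≤` with the branches swapped; same function, same chunks
theorem pv_fold_chunks_le {α : Type} (f : α → Int) (thr : Int) (d : α) (x : α) (t : List α) :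
    (let st := (PySem.List.pyRange 1 (((x :: t).length : Nat) : Int)).foldl
        (fun (s : List (List α) × List α) i =>
          if |f (PySem.List.pyGetD (x :: t) i d) - f (PySem.List.pyGetD (x :: t) (i - 1) d)| ≤ thr then
            (s.1, s.2 ++ [PySem.List.pyGetD (x :: t) i d])
          else
            (s.1 ++ [s.2], [PySem.List.pyGetD (x :: t) i d]))
        ([], [PySem.List.pyGetD (x :: t) 0 d])
     st.1 ++ [st.2]) = pvChunks f thr (x :: t) := by
  have hfun : (fun (s : List (List α) × List α) i =>
        if |f (PySem.List.pyGetD (x :: t) i d) - f (PySem.List.pyGetD (x :: t) (i - 1) d)| ≤ thr then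
          (s.1, s.2 ++ [PySem.List.pyGetD (x :: t) i d])
        else
          (s.1 ++ [s.2], [PySem.List.pyGetD (x :: t) i d]))
      = (fun (s : List (List α) × List α) i =>
        if thr < |f (PySem.List.pyGetD (x :: t) i d) - f (PySem.List.pyGetD (x :: t) (i - 1) d)| then
          (s.1 ++ [s.2], [PySem.List.pyGetD (x :: t) i d])
        else
          (s.1, s.2 ++ [PySem.List.pyGetD (x :: t) i d])) := by
    funext s i
    by_cases h : |f (PySem.List.pyGetD (x :: t) i d) - f (PySem.List.pyGetD (x :: t) (i - 1) d)| ≤ thr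
    · rw [if_pos h, if_neg (not_lt.2 h)]
    · rw [if_neg h, if_pos (lt_of_not_ge h)]
  simp only
  rw [hfun]
  have := pv_fold_chunks f thr d x t
  simp only at this
  exact this

-- one row of A's step 2 equals B's filtered split of that row
theorem pv_row_eq (ht : Int) (row : List (List (String × List Int))) (hrow : row ≠ [])
    (aq : List (List (List (String × List Int)))) :
    List.foldl
      (fun aq group =>
        if 1 ≤ (PySem.List.sorted group fun b => pvCoord b 0).length ∧
            (PySem.List.sorted group fun b => pvCoord b 0).length ≤ 8 then
          aq ++ [PySem.List.sorted group fun b => pvCoord b 0]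
        else aq)
      aq
      ((List.foldl
            (fun (s : List (List (List (String × List Int))) × List (List (String × List Int))) i =>
              if ht < |pvCoord (PySem.List.pyGetD (PySem.List.sorted row fun b => pvCoord b 0) i []) 0 -
                    pvCoord (PySem.List.pyGetD (PySem.List.sorted row fun b => pvCoord b 0) (i - 1) []) 0| then
                (s.1 ++ [s.2], [PySem.List.pyGetD (PySem.List.sorted row fun b => pvCoord b 0) i []])
              else (s.1, s.2 ++ [PySem.List.pyGetD (PySem.List.sorted row fun b => pvCoord b 0) i []]))
            ([], [PySem.List.pyGetD (PySem.List.sorted row fun b => pvCoord b 0) 0 []])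
            (PySem.List.pyRange 1 ((PySem.List.sorted row fun b => pvCoord b 0).length : Int))).1 ++
        [(List.foldl
              (fun (s : List (List (List (String × List Int))) × List (List (String × List Int))) i =>
                if ht < |pvCoord (PySem.List.pyGetD (PySem.List.sorted row fun b => pvCoord b 0) i []) 0 -
                      pvCoord (PySem.List.pyGetD (PySem.List.sorted row fun b => pvCoord b 0) (i - 1) []) 0| then
                  (s.1 ++ [s.2], [PySem.List.pyGetD (PySem.List.sorted row fun b => pvCoord b 0) i []])
                else (s.1, s.2 ++ [PySem.List.pyGetD (PySem.List.sorted row fun b => pvCoord b 0) i []]))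
              ([], [PySem.List.pyGetD (PySem.List.sorted row fun b => pvCoord b 0) 0 []])
              (PySem.List.pyRange 1 ((PySem.List.sorted row fun b => pvCoord b 0).length : Int))).2])
    = aq ++ List.filter (fun g => decide (g.length ≤ 8))
        (pvSplit (PySem.List.sorted row fun b => pvCoord b 0).length
          (PySem.List.sorted row fun b => pvCoord b 0) 0 ht) := by
  have hrs : (PySem.List.sorted row fun b => pvCoord b 0) ≠ [] := by
    rw [Ne, PySem.List.sorted_eq_nil_iff]
    exact hrow
  obtain ⟨x', t', hx⟩ := List.exists_cons_of_ne_nil hrs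
  rw [hx]
  have hA := pv_fold_chunks (fun b => pvCoord b 0) ht ([] : List (String × List Int)) x' t'
  simp only at hA
  rw [hA]
  rw [show pvSplit (x' :: t').length (x' :: t') 0 ht
      = pvChunks (fun b => pvCoord b 0) ht (x' :: t') from
    pvSplit_eq_chunks 0 ht (x' :: t').length (x' :: t') (le_refl _)]
  rw [PySem.List.foldl_append_ite
      (p := fun group => 1 ≤ (PySem.List.sorted group fun b => pvCoord b 0).length ∧
        (PySem.List.sorted group fun b => pvCoord b 0).length ≤ 8)
      (f := fun group => PySem.List.sorted group fun b => pvCoord b 0)]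
  congr 1
  have hpw : List.Pairwise (fun a b => pvCoord a 0 ≤ pvCoord b 0) (x' :: t') := by
    rw [← hx]
    exact PySem.List.sorted_pairwise row (fun b => pvCoord b 0)
  have hsg : ∀ g ∈ pvChunks (fun b => pvCoord b 0) ht (x' :: t'),
      (PySem.List.sorted g fun b => pvCoord b 0) = g := by
    intro g hg
    exact PySem.List.sorted_eq_self_of_pairwise g _ (hpw.sublist (pvChunks_sublist _ _ _ g hg))
  have hfc : List.filter
        (fun g => decide (1 ≤ (PySem.List.sorted g fun b => pvCoord b 0).length ∧
          (PySem.List.sorted g fun b => pvCoord b 0).length ≤ 8))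
        (pvChunks (fun b => pvCoord b 0) ht (x' :: t'))
      = List.filter (fun g => decide (g.length ≤ 8)) (pvChunks (fun b => pvCoord b 0) ht (x' :: t')) := by
    apply List.filter_congr
    intro g hg
    rw [hsg g hg]
    have h2 : 0 < g.length := List.length_pos_of_ne_nil (pvChunks_ne_nil _ _ _ g hg)
    exact decide_eq_decide.2 (by omega)
  rw [hfc, List.map_congr_left (fun g hg => hsg g (List.mem_of_mem_filter hg)), List.map_id']

-- ===== VERDICT (by name: the statement is the Claim_ definition above) =====
theorem group_bubbles_into_questions_spec : Claim_equal_group_bubbles_into_questions := by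
  intro bubbles vt ht _dom _pre
  unfold Spec_group_bubbles_into_questions
  by_cases hnil : bubbles = []
  · subst hnil
    rfl
  · have hsnil : PySem.List.sorted bubbles (fun b => pvCoord b 1) ≠ [] := by
      rw [Ne, PySem.List.sorted_eq_nil_iff]
      exact hnil
    obtain ⟨x, t, hsy⟩ := List.exists_cons_of_ne_nil hsnil
    simp only [group_bubbles_into_questions, group_bubbles_into_questions_alt, if_neg hnil]
    rw [hsy]
    have h1 := pv_fold_chunks_le (fun b => pvCoord b 1) vt ([] : List (String × List Int)) x t
    simp only at h1
    rw [h1]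
    rw [show pvSplit (x :: t).length (x :: t) 1 vt
        = pvChunks (fun b => pvCoord b 1) vt (x :: t) from
      pvSplit_eq_chunks 1 vt (x :: t).length (x :: t) (le_refl _)]
    conv_rhs => rw [← List.nil_append (List.flatMap (fun row =>
      List.filter (fun g => decide (g.length ≤ 8))
        (pvSplit (PySem.List.sorted row fun b => pvCoord b 0).length
          (PySem.List.sorted row fun b => pvCoord b 0) 0 ht))
      (pvChunks (fun b => pvCoord b 1) vt (x :: t))),
      ← PySem.List.foldl_append_eq_flatMap]
    exact PySem.List.foldl_congr_mem _ _ _ _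
      (fun acc row hr => pv_row_eq ht row (pvChunks_ne_nil _ _ _ row hr) acc)
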